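-- pv_equiv track=rewrite | github.com/olsenw/LeetCodeExercises | Python3/count_number_of_times.py | numTeams_tle
-- ===== SOURCE A (Python) =====
-- from typing import List, Dict, Set, Optional
--
-- def numTeams_tle(rating: List[int]) -> int:
--     n = len(rating)
--     a = 0
--     for i in range(n):
--         for j in range(i+1,n):
--             for k in range(j+1,n):
--                 if rating[i] < rating[j] < rating[k]:
--                     a += 1
--                 if rating[i] > rating[j] > rating[k]:
--                     a += 1
--     return a
-- ===== SOURCE B (Python) =====
-- def numTeams_tle(rating):
--     n = len(rating)
--     total = 0
--     for j in range(n):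
--         ls = sum(1 for i in range(j) if rating[i] < rating[j])
--         lg = sum(1 for i in range(j) if rating[i] > rating[j])
--         rs = sum(1 for k in range(j + 1, n) if rating[j] < rating[k])
--         rg = sum(1 for k in range(j + 1, n) if rating[j] > rating[k])
--         total += ls * rs + lg * rg
--     return total
-- ===== Notes on version B (the rewrite author's own statement) =====
-- stated objective: faster
-- what changed: Replaced the O(n^3) triple loop over all index triples by fixing the middle index j and multiplying the count of smaller/larger elements on the left by the count of larger/smaller elements on the right, an O(n^2) computation.
import Mathlib
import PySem

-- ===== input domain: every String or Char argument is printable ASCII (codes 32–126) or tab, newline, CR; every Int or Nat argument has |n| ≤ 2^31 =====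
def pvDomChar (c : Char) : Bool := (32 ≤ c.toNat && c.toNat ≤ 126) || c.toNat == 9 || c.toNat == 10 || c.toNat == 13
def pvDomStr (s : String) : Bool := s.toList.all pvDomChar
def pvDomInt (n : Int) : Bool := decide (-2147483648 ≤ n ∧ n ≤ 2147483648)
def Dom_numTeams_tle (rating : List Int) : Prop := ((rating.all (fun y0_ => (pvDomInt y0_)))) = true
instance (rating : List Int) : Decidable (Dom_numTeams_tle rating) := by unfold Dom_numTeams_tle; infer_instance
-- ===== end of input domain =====

-- B replaces A's O(n^3) triple loop by fixing the middle index and multiplying left/right counts (asymptotically faster).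


def numTeams_tle (rating : List Int) : Int :=
  let n : Int := rating.length
  (PySem.List.pyRange 0 n 1).foldl (fun a i =>
    (PySem.List.pyRange (i + 1) n 1).foldl (fun a j =>
      (PySem.List.pyRange (j + 1) n 1).foldl (fun a k =>
        let a := if PySem.List.pyGetD rating i 0 < PySem.List.pyGetD rating j 0 ∧
                    PySem.List.pyGetD rating j 0 < PySem.List.pyGetD rating k 0 then a + 1 else a
        if PySem.List.pyGetD rating i 0 > PySem.List.pyGetD rating j 0 ∧
           PySem.List.pyGetD rating j 0 > PySem.List.pyGetD rating k 0 then a + 1 else a) a) a) 0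

-- ===== PORT B =====
def numTeams_tle_alt (rating : List Int) : Int :=
  let n : Int := rating.length
  (PySem.List.pyRange 0 n 1).foldl (fun total j =>
    let ls := ((PySem.List.pyRange 0 j 1).map (fun i =>
      if PySem.List.pyGetD rating i 0 < PySem.List.pyGetD rating j 0 then (1 : Int) else 0)).sum
    let lg := ((PySem.List.pyRange 0 j 1).map (fun i =>
      if PySem.List.pyGetD rating i 0 > PySem.List.pyGetD rating j 0 then (1 : Int) else 0)).sum
    let rs := ((PySem.List.pyRange (j + 1) n 1).map (fun k =>
      if PySem.List.pyGetD rating j 0 < PySem.List.pyGetD rating k 0 then (1 : Int) else 0)).sum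
    let rg := ((PySem.List.pyRange (j + 1) n 1).map (fun k =>
      if PySem.List.pyGetD rating j 0 > PySem.List.pyGetD rating k 0 then (1 : Int) else 0)).sum
    total + ls * rs + lg * rg) 0

-- ===== PRECONDITION & SPEC =====
def Spec_numTeams_tle (rating : List Int) (out : Int) : Prop := out = numTeams_tle_alt rating
instance (rating : List Int) (out : Int) : Decidable (Spec_numTeams_tle rating out) := by unfold Spec_numTeams_tle; infer_instance

-- ===== CLAIM (what is proved, stated in full; the proofs are below) =====
def Claim_equal_numTeams_tle : Prop := ∀ (rating : List Int), Dom_numTeams_tle rating → Spec_numTeams_tle rating (numTeams_tle rating)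

-- ===== LEMMAS AND PROOFS =====
lemma sum_map_pyRange (h : Int → Int) (a b : Int) :
    ((PySem.List.pyRange a b 1).map h).sum = ∑ x ∈ Finset.Ico a b, h x := by
  induction hn : (b - a).toNat generalizing a with
  | zero =>
    rw [PySem.List.pyRange_one_eq_nil (by omega), Finset.Ico_eq_empty (by omega)]
    simp
  | succ m ih =>
    have hab : a < b := by omega
    rw [PySem.List.pyRange_one_cons hab]
    have hset : Finset.Ico a b = insert a (Finset.Ico (a + 1) b) := by
      ext x; simp [Finset.mem_Ico]; omega
    rw [hset, Finset.sum_insert (by simp [Finset.mem_Ico])]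
    simp [ih (a + 1) (by omega)]

lemma sum_Ico_swap (n : Int) (F : Int → Int → Int) :
    ∑ i ∈ Finset.Ico 0 n, ∑ j ∈ Finset.Ico (i + 1) n, F i j
      = ∑ j ∈ Finset.Ico 0 n, ∑ i ∈ Finset.Ico 0 j, F i j := by
  have h1 : ∀ i ∈ Finset.Ico (0:Int) n,
      ∑ j ∈ Finset.Ico (i + 1) n, F i j = ∑ j ∈ Finset.Ico 0 n, if i < j then F i j else 0 := by
    intro i hi
    rw [← Finset.sum_filter]
    congr 1
    ext x; simp [Finset.mem_Ico] at hi ⊢; omega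
  rw [Finset.sum_congr rfl h1, Finset.sum_comm]
  refine Finset.sum_congr rfl (fun j hj => ?_)
  rw [← Finset.sum_filter]
  congr 1
  ext x; simp [Finset.mem_Ico] at hj ⊢; omega

lemma ite_and_mul (p q : Prop) [Decidable p] [Decidable q] :
    (if p ∧ q then (1:Int) else 0) = (if p then (1:Int) else 0) * (if q then (1:Int) else 0) := by
  by_cases hp : p <;> by_cases hq : q <;> simp [hp, hq]

theorem main (rating : List Int) : numTeams_tle rating = numTeams_tle_alt rating := by
  set g : Int → Int := fun t => PySem.List.pyGetD rating t 0 with hg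
  set n : Int := (rating.length : Int) with hn
  have hA : numTeams_tle rating
      = ∑ i ∈ Finset.Ico 0 n, ∑ j ∈ Finset.Ico (i + 1) n, ∑ k ∈ Finset.Ico (j + 1) n,
          ((if g i < g j ∧ g j < g k then (1:Int) else 0)
           + (if g i > g j ∧ g j > g k then (1:Int) else 0)) := by
    have hinner : ∀ (i j a0 : Int),
        (PySem.List.pyRange (j + 1) n 1).foldl (fun a k =>
          let a := if g i < g j ∧ g j < g k then a + 1 else a
          if g i > g j ∧ g j > g k then a + 1 else a) a0
        = a0 + ∑ k ∈ Finset.Ico (j + 1) n,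
            ((if g i < g j ∧ g j < g k then (1:Int) else 0)
             + (if g i > g j ∧ g j > g k then (1:Int) else 0)) := by
      intro i j a0
      rw [PySem.List.foldl_congr_mem (PySem.List.pyRange (j + 1) n 1)
        (fun a k => let a := if g i < g j ∧ g j < g k then a + 1 else a
                    if g i > g j ∧ g j > g k then a + 1 else a)
        (fun a k => a + ((if g i < g j ∧ g j < g k then (1:Int) else 0)
             + (if g i > g j ∧ g j > g k then (1:Int) else 0)))
        a0 (by intro acc k _; dsimp only; split_ifs <;> ring)]
      rw [PySem.List.foldl_add, sum_map_pyRange]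
    have hmid : ∀ (i a0 : Int),
        (PySem.List.pyRange (i + 1) n 1).foldl (fun a j =>
          (PySem.List.pyRange (j + 1) n 1).foldl (fun a k =>
            let a := if g i < g j ∧ g j < g k then a + 1 else a
            if g i > g j ∧ g j > g k then a + 1 else a) a) a0
        = a0 + ∑ j ∈ Finset.Ico (i + 1) n, ∑ k ∈ Finset.Ico (j + 1) n,
            ((if g i < g j ∧ g j < g k then (1:Int) else 0)
             + (if g i > g j ∧ g j > g k then (1:Int) else 0)) := by
      intro i a0
      rw [PySem.List.foldl_congr_mem (PySem.List.pyRange (i + 1) n 1)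
        (fun a j => (PySem.List.pyRange (j + 1) n 1).foldl (fun a k =>
            let a := if g i < g j ∧ g j < g k then a + 1 else a
            if g i > g j ∧ g j > g k then a + 1 else a) a)
        (fun a j => a + ∑ k ∈ Finset.Ico (j + 1) n,
            ((if g i < g j ∧ g j < g k then (1:Int) else 0)
             + (if g i > g j ∧ g j > g k then (1:Int) else 0)))
        a0 (by intro acc j _; exact hinner i j acc)]
      rw [PySem.List.foldl_add, sum_map_pyRange]
    show (PySem.List.pyRange 0 n 1).foldl _ 0 = _
    rw [PySem.List.foldl_congr_mem (PySem.List.pyRange 0 n 1)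
      (fun a i => (PySem.List.pyRange (i + 1) n 1).foldl (fun a j =>
          (PySem.List.pyRange (j + 1) n 1).foldl (fun a k =>
            let a := if g i < g j ∧ g j < g k then a + 1 else a
            if g i > g j ∧ g j > g k then a + 1 else a) a) a)
      (fun a i => a + ∑ j ∈ Finset.Ico (i + 1) n, ∑ k ∈ Finset.Ico (j + 1) n,
          ((if g i < g j ∧ g j < g k then (1:Int) else 0)
           + (if g i > g j ∧ g j > g k then (1:Int) else 0)))
      0 (by intro acc i _; exact hmid i acc)]
    rw [PySem.List.foldl_add, sum_map_pyRange, zero_add]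
  have hB : numTeams_tle_alt rating
      = ∑ j ∈ Finset.Ico 0 n,
          ((∑ i ∈ Finset.Ico 0 j, if g i < g j then (1:Int) else 0)
             * (∑ k ∈ Finset.Ico (j + 1) n, if g j < g k then (1:Int) else 0)
           + (∑ i ∈ Finset.Ico 0 j, if g i > g j then (1:Int) else 0)
             * (∑ k ∈ Finset.Ico (j + 1) n, if g j > g k then (1:Int) else 0)) := by
    show (PySem.List.pyRange 0 n 1).foldl _ 0 = _
    rw [PySem.List.foldl_congr_mem (PySem.List.pyRange 0 n 1)
      (fun total j =>
        let ls := ((PySem.List.pyRange 0 j 1).map (fun i => if g i < g j then (1:Int) else 0)).sum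
        let lg := ((PySem.List.pyRange 0 j 1).map (fun i => if g i > g j then (1:Int) else 0)).sum
        let rs := ((PySem.List.pyRange (j + 1) n 1).map (fun k => if g j < g k then (1:Int) else 0)).sum
        let rg := ((PySem.List.pyRange (j + 1) n 1).map (fun k => if g j > g k then (1:Int) else 0)).sum
        total + ls * rs + lg * rg)
      (fun total j => total +
          ((∑ i ∈ Finset.Ico 0 j, if g i < g j then (1:Int) else 0)
             * (∑ k ∈ Finset.Ico (j + 1) n, if g j < g k then (1:Int) else 0)
           + (∑ i ∈ Finset.Ico 0 j, if g i > g j then (1:Int) else 0)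
             * (∑ k ∈ Finset.Ico (j + 1) n, if g j > g k then (1:Int) else 0)))
      0 (by intro acc j _; dsimp only; rw [sum_map_pyRange, sum_map_pyRange, sum_map_pyRange, sum_map_pyRange]; ring)]
    rw [PySem.List.foldl_add, sum_map_pyRange, zero_add]
  rw [hA, hB]
  calc
    ∑ i ∈ Finset.Ico 0 n, ∑ j ∈ Finset.Ico (i + 1) n, ∑ k ∈ Finset.Ico (j + 1) n,
        ((if g i < g j ∧ g j < g k then (1:Int) else 0)
         + (if g i > g j ∧ g j > g k then (1:Int) else 0))
      = ∑ i ∈ Finset.Ico 0 n, ∑ j ∈ Finset.Ico (i + 1) n,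
          ((if g i < g j then (1:Int) else 0)
             * (∑ k ∈ Finset.Ico (j + 1) n, if g j < g k then (1:Int) else 0)
           + (if g i > g j then (1:Int) else 0)
             * (∑ k ∈ Finset.Ico (j + 1) n, if g j > g k then (1:Int) else 0)) := by
        refine Finset.sum_congr rfl fun i _ => Finset.sum_congr rfl fun j _ => ?_
        simp only [ite_and_mul]
        rw [Finset.sum_add_distrib, ← Finset.mul_sum, ← Finset.mul_sum]
    _ = ∑ j ∈ Finset.Ico 0 n, ∑ i ∈ Finset.Ico 0 j,
          ((if g i < g j then (1:Int) else 0)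
             * (∑ k ∈ Finset.Ico (j + 1) n, if g j < g k then (1:Int) else 0)
           + (if g i > g j then (1:Int) else 0)
             * (∑ k ∈ Finset.Ico (j + 1) n, if g j > g k then (1:Int) else 0)) :=
        sum_Ico_swap n _
    _ = ∑ j ∈ Finset.Ico 0 n,
          ((∑ i ∈ Finset.Ico 0 j, if g i < g j then (1:Int) else 0)
             * (∑ k ∈ Finset.Ico (j + 1) n, if g j < g k then (1:Int) else 0)
           + (∑ i ∈ Finset.Ico 0 j, if g i > g j then (1:Int) else 0)
             * (∑ k ∈ Finset.Ico (j + 1) n, if g j > g k then (1:Int) else 0)) := by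
        refine Finset.sum_congr rfl fun j _ => ?_
        rw [Finset.sum_add_distrib, ← Finset.sum_mul, ← Finset.sum_mul]

-- ===== VERDICT (by name: the statement is the Claim_ definition above) =====
theorem numTeams_tle_spec : Claim_equal_numTeams_tle := by
  intro rating _
  unfold Spec_numTeams_tle
  exact main rating
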